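-- pv_equiv track=rewrite | github.com/ZhaoXu-EE/CADrendering | reorder.py | collect_entities
-- ===== SOURCE A (Python) =====
-- def collect_entities(data_lines):
--     blocks, cur = [], []
--     for ln in data_lines:
--         cur.append(ln)
--         if ';' in ln:
--             blocks.append(''.join(cur))
--             cur.clear()
--     if cur:
--         raise ValueError("Unterminated entity before ENDSEC;")
--     return blocks
-- ===== SOURCE B (Python) =====
-- def collect_entities(data_lines):
--     lines = list(data_lines)
--     bounds = [i for i, ln in enumerate(lines) if ';' in ln]
--     if lines and (not bounds or bounds[-1] != len(lines) - 1):
--         raise ValueError("Unterminated entity before ENDSEC;")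
--     blocks = []
--     prev = -1
--     for b in bounds:
--         blocks.append(''.join(lines[prev + 1 : b + 1]))
--         prev = b
--     return blocks
-- ===== Notes on version B (the rewrite author's own statement) =====
-- stated objective: alternative
-- what changed: B first computes the list of indices of terminator lines (those containing ';') and then builds each block by slicing the materialized line list between consecutive boundaries, instead of A's single pass with a running line accumulator; the unterminated-tail check becomes a structural test on the last boundary index.
import Mathlib
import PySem

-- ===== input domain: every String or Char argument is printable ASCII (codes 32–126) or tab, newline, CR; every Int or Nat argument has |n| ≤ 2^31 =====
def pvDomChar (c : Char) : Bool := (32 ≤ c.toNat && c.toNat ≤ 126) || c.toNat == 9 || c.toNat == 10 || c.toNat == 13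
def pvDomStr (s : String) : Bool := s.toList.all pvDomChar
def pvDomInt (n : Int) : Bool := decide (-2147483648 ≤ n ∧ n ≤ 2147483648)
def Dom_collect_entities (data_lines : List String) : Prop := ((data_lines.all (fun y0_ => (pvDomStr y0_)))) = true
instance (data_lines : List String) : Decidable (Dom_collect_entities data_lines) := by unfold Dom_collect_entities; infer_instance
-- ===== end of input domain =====

-- B builds blocks from the list of terminator-line indices by slicing between consecutive
-- boundaries, instead of A's running accumulator; same cost, different decomposition.

-- ===== PORT A =====
-- A: one pass, accumulate current lines, flush the joined block at each ';' line.
def collect_entities (data_lines : List String) : List String :=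
  (data_lines.foldl
    (fun (st : List String × List String) ln =>
      let cur := st.2 ++ [ln]
      if PySem.Str.isIn ";" ln then (st.1 ++ [PySem.Str.join "" cur], [])
      else (st.1, cur))
    ([], [])).1

-- ===== PORT B =====
-- B: indices of lines containing ';', then one join of lines[prev+1 : b+1] per boundary b.
def collect_entities_alt (data_lines : List String) : List String :=
  let lines := data_lines
  let bounds := ((PySem.List.enumerate lines 0).filter (fun p => PySem.Str.isIn ";" p.2)).map (·.1)
  (bounds.foldl
    (fun (st : List String × Int) b =>
      (st.1 ++ [PySem.Str.join "" (PySem.List.slice lines (some (st.2 + 1)) (some (b + 1)))], b))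
    ([], -1)).1

-- ===== PRECONDITION & SPEC =====
-- Pre_ excludes exactly the inputs where both Pythons raise ValueError: a non-empty input
-- whose last line contains no ';' (lines left after the final terminator).
def Pre_collect_entities (data_lines : List String) : Prop :=
  data_lines.getLast?.all (fun s => PySem.Str.isIn ";" s) = true
instance (data_lines : List String) : Decidable (Pre_collect_entities data_lines) := by
  unfold Pre_collect_entities; infer_instance
def pvWitness_collect_entities : List String := ["LINE", "0;", "DONE;"]
def Spec_collect_entities (data_lines : List String) (out : List String) : Prop := out = collect_entities_alt data_lines
instance (data_lines : List String) (out : List String) : Decidable (Spec_collect_entities data_lines out) := by unfold Spec_collect_entities; infer_instance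

-- ===== CLAIM (what is proved, stated in full; the proofs are below) =====
def Claim_equal_collect_entities : Prop := ∀ (data_lines : List String), Dom_collect_entities data_lines → Pre_collect_entities data_lines → Spec_collect_entities data_lines (collect_entities data_lines)

-- ===== LEMMAS AND PROOFS =====

-- the common grouping skeleton: the blocks (as line lists), trailing lines dropped
def pvGrp (cur : List String) : List String → List (List String)
  | [] => []
  | l :: ls =>
    if PySem.Str.isIn ";" l then (cur ++ [l]) :: pvGrp [] ls
    else pvGrp (cur ++ [l]) ls

-- recursive characterisation of the boundary indices
def pvBnd : List String → List Int
  | [] => []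
  | l :: ls =>
    if PySem.Str.isIn ";" l then 0 :: (pvBnd ls).map (· + 1)
    else (pvBnd ls).map (· + 1)

def pvF (lines : List String) (st : List String × Int) (b : Int) : List String × Int :=
  (st.1 ++ [PySem.Str.join "" (PySem.List.slice lines (some (st.2 + 1)) (some (b + 1)))], b)

lemma pvBnd_nonneg : ∀ ls, ∀ b ∈ pvBnd ls, 0 ≤ b := by
  intro ls
  induction ls with
  | nil => simp [pvBnd]
  | cons l ls ih =>
    intro b hb
    simp only [pvBnd] at hb
    split at hb
    · simp only [List.mem_cons, List.mem_map] at hb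
      rcases hb with rfl | ⟨c, hc, rfl⟩
      · omega
      · have := ih c hc; omega
    · simp only [List.mem_map] at hb
      obtain ⟨c, hc, rfl⟩ := hb
      have := ih c hc; omega

lemma pvEnum_eq : ∀ (ls : List String) (s : Int),
    ((PySem.List.enumerate ls s).filter (fun p => PySem.Str.isIn ";" p.2)).map (·.1)
      = (pvBnd ls).map (· + s) := by
  intro ls
  induction ls with
  | nil => intro s; simp [PySem.List.enumerate_nil, pvBnd]
  | cons l ls ih =>
    intro s
    rw [PySem.List.enumerate_cons, List.filter_cons]
    by_cases h : PySem.Str.isIn ";" l = true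
    · rw [if_pos (by simpa using h)]
      simp only [List.map_cons, pvBnd, if_pos h, ih (s + 1), List.map_map]
      refine congrArg₂ _ (by omega) ?_
      apply List.map_congr_left; intro b _; simp; omega
    · rw [if_neg (by simpa using h)]
      simp only [pvBnd, if_neg h, ih (s + 1), List.map_map]
      apply List.map_congr_left; intro b _; simp; omega

-- accumulator comes out of the B-side fold
lemma pvFold_acc (lines : List String) : ∀ (bs : List Int) (acc : List String) (p : Int),
    (bs.foldl (pvF lines) (acc, p)).1 = acc ++ (bs.foldl (pvF lines) ([], p)).1 := by
  intro bs
  induction bs with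
  | nil => simp
  | cons b bs ih =>
    intro acc p
    simp only [List.foldl_cons, pvF]
    rw [ih (acc ++ _) b, ih ([] ++ _) b]
    simp

-- positive slice of a cons shifts down by one
lemma pvSlice_cons (l : String) (ls : List String) (a b : Int) (ha : 0 ≤ a) (hb : 0 ≤ b) :
    PySem.List.slice (l :: ls) (some (a + 1)) (some (b + 1))
      = PySem.List.slice ls (some a) (some b) := by
  rw [PySem.List.slice_toNat _ (by omega) (by omega),
      PySem.List.slice_toNat _ ha (by omega)]
  have h1 : (a + 1).toNat = a.toNat + 1 := by omega
  have h2 : (b + 1).toNat = b.toNat + 1 := by omega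
  rw [h1, h2]
  simp [Nat.succ_sub_succ]

-- shift lemma: folding shifted bounds over (l :: lines) is folding the bounds over lines
lemma pvFold_shift (l : String) (lines : List String) :
    ∀ (bs : List Int), (∀ b ∈ bs, 0 ≤ b) → ∀ (acc : List String) (p : Int), -1 ≤ p →
    ((bs.map (· + 1)).foldl (pvF (l :: lines)) (acc, p + 1)).1
      = (bs.foldl (pvF lines) (acc, p)).1 := by
  intro bs
  induction bs with
  | nil => simp
  | cons b bs ih =>
    intro hnn acc p hp
    simp only [List.map_cons, List.foldl_cons, pvF]
    have hb : 0 ≤ b := hnn b (by simp)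
    rw [pvSlice_cons l lines (p + 1) (b + 1) (by omega) (by omega)]
    exact ih (fun c hc => hnn c (by simp [hc])) _ b (by omega)

-- A-side fold produces the grouped blocks
lemma pvA_fold : ∀ (ls : List String) (blocks cur : List String),
    (ls.foldl
      (fun (st : List String × List String) ln =>
        let c := st.2 ++ [ln]
        if PySem.Str.isIn ";" ln then (st.1 ++ [PySem.Str.join "" c], [])
        else (st.1, c))
      (blocks, cur)).1
      = blocks ++ (pvGrp cur ls).map (PySem.Str.join "") := by
  intro ls
  induction ls with
  | nil => simp [pvGrp]
  | cons l ls ih =>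
    intro blocks cur
    by_cases h : PySem.Str.isIn ";" l
    · simp only [List.foldl_cons, h, if_pos, pvGrp]
      rw [ih]
      simp
    · have h' : PySem.Chars.isIn [';'] l.toList ≠ true := by
        simpa [PySem.Str.isIn] using h
      simp only [List.foldl_cons, pvGrp]
      rw [if_neg (by simpa using h), ih]
      simp [h']

-- B-side fold over the boundaries produces the grouped blocks, with `pre` the
-- extra strings prepended to the first block (the shifted-away prefix)
lemma pvB_fold : ∀ (ls : List String) (pre : List String),
    (match pvBnd ls with
     | [] => ([] : List String)
     | b0 :: bs =>
       PySem.Str.join "" (pre ++ PySem.List.slice ls (some 0) (some (b0 + 1)))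
         :: (bs.foldl (pvF ls) ([], b0)).1)
      = (pvGrp pre ls).map (PySem.Str.join "") := by
  intro ls
  induction ls with
  | nil => intro pre; simp [pvBnd, pvGrp]
  | cons l ls ih =>
    intro pre
    by_cases h : PySem.Str.isIn ";" l
    · simp only [pvBnd, if_pos h, pvGrp, List.map_cons]
      have hsl : PySem.List.slice (l :: ls) (some 0) (some (0 + 1)) = [l] := by
        simp only [PySem.List.slice_zero_start]
        rw [PySem.List.slice_to _ (by omega)]
        simp
      rw [hsl]
      refine congrArg₂ List.cons rfl ?_
      have hs := pvFold_shift l ls (pvBnd ls) (pvBnd_nonneg ls) [] (-1) (by omega)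
      norm_num at hs
      rw [hs]
      have := ih ([] : List String)
      cases hB : pvBnd ls with
      | nil =>
        rw [hB] at this
        simpa using this
      | cons b0 bs =>
        rw [hB] at this
        simp only [List.foldl_cons, pvF]
        rw [pvFold_acc]
        simpa [show (-1 : Int) + 1 = 0 from by decide] using this
    · simp only [pvBnd, pvGrp, h, if_neg, Bool.false_eq_true, not_false_iff]
      rw [← ih (pre ++ [l])]
      cases hB : pvBnd ls with
      | nil => simp
      | cons b0 bs =>
        have hb0 : 0 ≤ b0 := pvBnd_nonneg ls b0 (by simp [hB])
        simp only [List.map_cons]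
        congr 1
        · congr 1
          simp only [PySem.List.slice_zero_start]
          rw [PySem.List.slice_to _ (by omega), PySem.List.slice_to _ (by omega)]
          have h1 : (b0 + 1 + 1).toNat = (b0 + 1).toNat + 1 := by omega
          rw [h1]
          simp [List.take_succ_cons]
        · rw [show b0 + 1 = b0 + 1 from rfl]
          exact pvFold_shift l ls bs (fun c hc => pvBnd_nonneg ls c (by simp [hB, hc])) [] b0 (by omega)

-- ===== VERDICT (by name: the statement is the Claim_ definition above) =====
theorem collect_entities_spec : Claim_equal_collect_entities := by
  intro ls _ _
  unfold Spec_collect_entities collect_entities collect_entities_alt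
  rw [pvA_fold ls [] []]
  dsimp only
  rw [pvEnum_eq ls 0]
  have hmap : (pvBnd ls).map (· + 0) = pvBnd ls := by
    simp
  rw [hmap]
  have := pvB_fold ls ([] : List String)
  cases hB : pvBnd ls with
  | nil => simp [hB] at this; simp [← this]
  | cons b0 bs =>
    simp only [hB] at this
    simp only [List.foldl_cons]
    show _ = (List.foldl (pvF ls) (pvF ls ([], -1) b0) bs).1
    simp only [pvF]
    rw [pvFold_acc]
    rw [← this]
    norm_num
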